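-- pv_equiv track=rewrite | github.com/davidhuckfield/Codewars_Solutions | 7 kyu/snail.py | can_snail_reach_end
-- ===== SOURCE A (Python) =====
-- def can_snail_reach_end(length, speed, length_increases):
--     snail_position=0
--     rubber_band_end=length
--     for i in range (525600):
--         snail_position+=speed
--         rubber_band_end+=length_increases
--         if snail_position >= rubber_band_end:
--             return True
--     return False
-- ===== SOURCE B (Python) =====
-- def can_snail_reach_end(length, speed, length_increases):
--     # Closed form: after i minutes the gap is length + i*(length_increases - speed);
--     # with net gain d = speed - length_increases the snail reaches iff d*i >= length
--     # for some 1 <= i <= 525600. If d > 0 the best chance is i = 525600, else i = 1.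
--     d = speed - length_increases
--     if d > 0:
--         return d * 525600 >= length
--     return d >= length
-- ===== Notes on version B (the rewrite author's own statement) =====
-- stated objective: faster
-- what changed: Replaced the 525600-iteration simulation loop by an O(1) closed form: with net gain d = speed - length_increases, the snail reaches iff d*525600 >= length when d > 0, else iff d >= length.
import Mathlib
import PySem

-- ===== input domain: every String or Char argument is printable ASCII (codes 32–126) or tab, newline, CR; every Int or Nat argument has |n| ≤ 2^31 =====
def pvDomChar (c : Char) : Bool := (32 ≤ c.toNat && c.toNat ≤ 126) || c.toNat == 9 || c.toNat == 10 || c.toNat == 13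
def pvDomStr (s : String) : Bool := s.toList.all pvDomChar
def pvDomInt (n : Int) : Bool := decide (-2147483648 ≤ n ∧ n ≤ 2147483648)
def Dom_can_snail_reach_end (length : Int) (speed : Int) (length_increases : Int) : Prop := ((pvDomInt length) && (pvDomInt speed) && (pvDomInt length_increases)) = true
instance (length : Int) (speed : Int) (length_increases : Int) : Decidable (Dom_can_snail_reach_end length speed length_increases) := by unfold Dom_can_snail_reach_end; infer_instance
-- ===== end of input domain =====

-- B replaces A's fixed 525600-step simulation loop by an O(1) closed-form test (objective: faster, constant-factor).


-- ===== PORT A =====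
-- the for-loop with early return, carried as structural recursion on the remaining iteration count,
-- with the same two state variables (snail_position, rubber_band_end)
def snailLoop (speed : Int) (length_increases : Int) (snail_position : Int) (rubber_band_end : Int) : Nat → Bool
  | 0 => false
  | n + 1 =>
    if snail_position + speed ≥ rubber_band_end + length_increases then true
    else snailLoop speed length_increases (snail_position + speed) (rubber_band_end + length_increases) n

def can_snail_reach_end (length : Int) (speed : Int) (length_increases : Int) : Bool :=
  snailLoop speed length_increases 0 length 525600

-- ===== PORT B =====
def can_snail_reach_end_alt (length : Int) (speed : Int) (length_increases : Int) : Bool :=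
  let d := speed - length_increases
  if d > 0 then d * 525600 ≥ length
  else d ≥ length

-- ===== PRECONDITION & SPEC =====
def Spec_can_snail_reach_end (length : Int) (speed : Int) (length_increases : Int) (out : Bool) : Prop := out = can_snail_reach_end_alt length speed length_increases
instance (length : Int) (speed : Int) (length_increases : Int) (out : Bool) : Decidable (Spec_can_snail_reach_end length speed length_increases out) := by unfold Spec_can_snail_reach_end; infer_instance

-- ===== CLAIM (what is proved, stated in full; the proofs are below) =====
def Claim_equal_can_snail_reach_end : Prop := ∀ (length : Int) (speed : Int) (length_increases : Int), Dom_can_snail_reach_end length speed length_increases → Spec_can_snail_reach_end length speed length_increases (can_snail_reach_end length speed length_increases)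

-- ===== LEMMAS AND PROOFS =====

-- characterisation of the loop: it returns true iff some step i (1 ≤ i ≤ n) puts the snail past the band end
theorem snailLoop_iff (s li : Int) (n : Nat) : ∀ (pos band : Int),
    snailLoop s li pos band n = true ↔
      ∃ i : Nat, 1 ≤ i ∧ i ≤ n ∧ band + li * i ≤ pos + s * i := by
  induction n with
  | zero =>
    intro pos band
    simp [snailLoop]
  | succ n ih =>
    intro pos band
    rw [snailLoop]
    split_ifs with h
    · constructor
      · intro _
        exact ⟨1, le_refl 1, by omega, by push_cast; linarith⟩
      · intro _; rfl
    · rw [ih]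
      constructor
      · rintro ⟨i, h1, h2, h3⟩
        refine ⟨i + 1, by omega, by omega, ?_⟩
        push_cast at h3 ⊢
        linarith
      · rintro ⟨i, h1, h2, h3⟩
        have hi1 : i ≠ 1 := by
          rintro rfl
          push_cast at h3
          omega
        refine ⟨i - 1, by omega, by omega, ?_⟩
        have : ((i - 1 : Nat) : Int) = (i : Int) - 1 := by omega
        rw [this]
        linarith

-- ===== VERDICT (by name: the statement is the Claim_ definition above) =====
theorem can_snail_reach_end_spec : Claim_equal_can_snail_reach_end := by
  intro length speed li _
  show can_snail_reach_end length speed li = can_snail_reach_end_alt length speed li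
  unfold can_snail_reach_end can_snail_reach_end_alt
  set d := speed - li with hd
  have key := snailLoop_iff speed li 525600 0 length
  by_cases hdp : d > 0
  · rw [if_pos hdp]
    by_cases hr : d * 525600 ≥ length
    · have : snailLoop speed li 0 length 525600 = true := by
        rw [key]
        refine ⟨525600, by omega, le_refl _, ?_⟩
        push_cast
        linarith
      simp [this, hr]
    · have : snailLoop speed li 0 length 525600 = false := by
        rw [Bool.eq_false_iff, Ne, key]
        rintro ⟨i, h1, h2, h3⟩
        have hdi : d * (i : Int) ≤ d * 525600 := by
          apply mul_le_mul_of_nonneg_left _ (le_of_lt hdp)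
          exact_mod_cast h2
        have : length ≤ d * (i : Int) := by linarith
        linarith [lt_of_not_ge hr]
      simp [this, hr]
  · rw [if_neg hdp]
    by_cases hr : d ≥ length
    · have : snailLoop speed li 0 length 525600 = true := by
        rw [key]
        refine ⟨1, le_refl 1, by omega, ?_⟩
        push_cast
        linarith
      simp [this, hr]
    · have : snailLoop speed li 0 length 525600 = false := by
        rw [Bool.eq_false_iff, Ne, key]
        rintro ⟨i, h1, h2, h3⟩
        have hd0 : d ≤ 0 := le_of_not_gt hdp
        have hi1 : (1 : Int) ≤ (i : Int) := by exact_mod_cast h1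
        have hdi : d * (i : Int) ≤ d * 1 := mul_le_mul_of_nonpos_left hi1 hd0
        have : length ≤ d * (i : Int) := by linarith
        linarith [lt_of_not_ge hr]
      simp [this, hr]
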